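-- pv_equiv track=rewrite | github.com/michael-burt/advent-of-code | 2021/day-03/python/main.py | filter_list_co2
-- ===== SOURCE A (Python) =====
-- def filter_list_co2(idx, bits, ):
--     positional_bit_list = [b[idx] for b in bits]
--     d = {
--         '0': len([b for b in positional_bit_list if b == '0']),
--         '1': len([b for b in positional_bit_list if b == '1']),
--     }
--     out = []
--     if d['1'] < d['0']:
--         for bit in bits:
--             if bit[idx] == '1':
--                 out.append(bit)
--     else:
--         for bit in bits:
--             if bit[idx] == '0':
--                 out.append(bit)
--     return out
-- ===== SOURCE B (Python) =====
-- def filter_list_co2(idx, bits):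
--     # One pass: partition into the two groups; the smaller '1'-group wins,
--     # ties (and the default) go to the '0'-group -- same as A's criterion.
--     zeros, ones = [], []
--     for b in bits:
--         c = b[idx]
--         if c == '0':
--             zeros.append(b)
--         elif c == '1':
--             ones.append(b)
--     return ones if len(ones) < len(zeros) else zeros
-- ===== Notes on version B (the rewrite author's own statement) =====
-- stated objective: simpler
-- what changed: B partitions bits into the '0'-group and '1'-group in a single pass and returns the appropriate partition directly, instead of A's three passes (extract characters, count each value, then re-filter the list).
import Mathlib
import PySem

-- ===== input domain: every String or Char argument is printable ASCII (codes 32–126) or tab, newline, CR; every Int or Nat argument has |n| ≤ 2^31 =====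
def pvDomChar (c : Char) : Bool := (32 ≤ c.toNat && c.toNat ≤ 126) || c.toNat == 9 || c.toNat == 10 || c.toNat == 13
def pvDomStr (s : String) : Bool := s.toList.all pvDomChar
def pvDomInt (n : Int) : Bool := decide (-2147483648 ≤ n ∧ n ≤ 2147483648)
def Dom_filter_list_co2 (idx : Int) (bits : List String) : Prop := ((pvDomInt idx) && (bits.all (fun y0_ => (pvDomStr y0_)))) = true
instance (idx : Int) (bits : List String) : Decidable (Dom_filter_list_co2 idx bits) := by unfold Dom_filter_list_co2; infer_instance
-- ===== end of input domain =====

-- B partitions bits into the '0'-group and '1'-group in a single pass and returns the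
-- appropriate partition directly, instead of A's three passes (objective: simpler).

-- ===== PORT A =====
def filter_list_co2 (idx : Int) (bits : List String) : List String :=
  let positional_bit_list := bits.map (fun b => PySem.Str.pyGet? b idx)
  let d0 := (positional_bit_list.filter (fun c => c == some '0')).length
  let d1 := (positional_bit_list.filter (fun c => c == some '1')).length
  if d1 < d0 then
    bits.foldl (fun out bit => if PySem.Str.pyGet? bit idx == some '1' then out ++ [bit] else out) []
  else
    bits.foldl (fun out bit => if PySem.Str.pyGet? bit idx == some '0' then out ++ [bit] else out) []

-- ===== PORT B =====
def filter_list_co2_alt (idx : Int) (bits : List String) : List String :=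
  let zo := bits.foldl (fun (p : List String × List String) b =>
      if PySem.Str.pyGet? b idx == some '0' then (p.1 ++ [b], p.2)
      else if PySem.Str.pyGet? b idx == some '1' then (p.1, p.2 ++ [b])
      else p) ([], [])
  if zo.2.length < zo.1.length then zo.2 else zo.1

-- ===== PRECONDITION & SPEC =====
-- Pre_ excludes exactly the inputs where Python A raises IndexError: some string has no
-- character at (possibly negative) index idx.  (B raises there too.)
def Pre_filter_list_co2 (idx : Int) (bits : List String) : Prop :=
  ∀ b ∈ bits, PySem.Raise.InRange b.toList.length idx
instance (idx : Int) (bits : List String) : Decidable (Pre_filter_list_co2 idx bits) := by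
  unfold Pre_filter_list_co2; infer_instance
def pvWitness_filter_list_co2 : Int × List String := (1, ["00", "01", "11"])
def Spec_filter_list_co2 (idx : Int) (bits : List String) (out : List String) : Prop := out = filter_list_co2_alt idx bits
instance (idx : Int) (bits : List String) (out : List String) : Decidable (Spec_filter_list_co2 idx bits out) := by unfold Spec_filter_list_co2; infer_instance

-- ===== CLAIM (what is proved, stated in full; the proofs are below) =====
def Claim_equal_filter_list_co2 : Prop := ∀ (idx : Int) (bits : List String), Dom_filter_list_co2 idx bits → Pre_filter_list_co2 idx bits → Spec_filter_list_co2 idx bits (filter_list_co2 idx bits)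

-- ===== LEMMAS AND PROOFS =====

-- B's single-pass fold computes the two filters of the list (generic in the lookup f).
theorem pv_fold_partition (f : String → Option Char) (bits : List String) (z o : List String) :
    bits.foldl (fun (p : List String × List String) b =>
      if f b == some '0' then (p.1 ++ [b], p.2)
      else if f b == some '1' then (p.1, p.2 ++ [b])
      else p) (z, o)
    = (z ++ bits.filter (fun b => f b == some '0'),
       o ++ bits.filter (fun b => f b == some '1')) := by
  induction bits generalizing z o with
  | nil => simp
  | cons b bs ih =>
    by_cases h0 : (f b == some '0') = true
    · have h1 : (f b == some '1') = false := by
        cases hc : f b <;> simp_all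
      rw [List.foldl_cons, if_pos h0, ih]
      simp [h0, h1]
    · by_cases h1 : (f b == some '1') = true
      · rw [List.foldl_cons, if_neg h0, if_pos h1, ih]
        simp [eq_false_of_ne_true h0, h1]
      · rw [List.foldl_cons, if_neg h0, if_neg h1, ih]
        simp [eq_false_of_ne_true h0, eq_false_of_ne_true h1]

-- A's counts over the mapped character list are the lengths of B's partitions.
theorem pv_count_eq (f : String → Option Char) (bits : List String) (c : Char) :
    ((bits.map f).filter (fun x => x == some c)).length
    = (bits.filter (fun b => f b == some c)).length := by
  rw [List.filter_map]
  simp [Function.comp_def]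

-- ===== VERDICT (by name: the statement is the Claim_ definition above) =====
theorem filter_list_co2_spec : Claim_equal_filter_list_co2 := by
  intro idx bits _ _
  show filter_list_co2 idx bits = filter_list_co2_alt idx bits
  unfold filter_list_co2 filter_list_co2_alt
  rw [pv_fold_partition (fun b => PySem.Str.pyGet? b idx)]
  simp only [List.nil_append, pv_count_eq, PySem.List.foldl_append_if_eq_filter]
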